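-- pv_equiv track=rewrite | github.com/itswin/santa-2023 | scripts/util.py | get_diff_odd_centers
-- ===== SOURCE A (Python) =====
-- def get_diff_odd_centers(n):
--     n2 = n ** 2
--     odd_centers = []
--
--     # Iterate through lines 2 to n-1 on each face
--     # Even lines should take the odd "centers"
--     # Odd lines should take the even "centers"
--     for face_start in range(0, 6 * n2, n2):
--         for row in range(1, n - 1):
--             # Iterate over each row from 2 to n-1
--             # Even lines should take the odd columns
--             # Odd lines should take the even columns
--             for col in range(1, n - 1):
--                 if row % 2 == 0 and col % 2 == 1:
--                     odd_centers.append(face_start + row * n + col)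
--                 elif row % 2 == 1 and col % 2 == 0:
--                     odd_centers.append(face_start + row * n + col)
--
--     return odd_centers
-- ===== SOURCE B (Python) =====
-- def get_diff_odd_centers(n):
--     base = []
--     for row in range(1, n - 1):
--         base.extend(row * n + col for col in range(1 + row % 2, n - 1, 2))
--     return [f * n * n + b for f in range(6) for b in base]
-- ===== Notes on version B (the rewrite author's own statement) =====
-- stated objective: simpler
-- what changed: B builds the one-face interior checkerboard template once by striding the columns (start 1+row%2, step 2, no per-cell parity test) and tiles it over the 6 faces with an additive offset, instead of A's per-face triple loop testing both parity branches on every cell.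
-- outside the precondition, e.g. on get_diff_odd_centers(0): A raises ValueError, B returns []
import Mathlib
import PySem

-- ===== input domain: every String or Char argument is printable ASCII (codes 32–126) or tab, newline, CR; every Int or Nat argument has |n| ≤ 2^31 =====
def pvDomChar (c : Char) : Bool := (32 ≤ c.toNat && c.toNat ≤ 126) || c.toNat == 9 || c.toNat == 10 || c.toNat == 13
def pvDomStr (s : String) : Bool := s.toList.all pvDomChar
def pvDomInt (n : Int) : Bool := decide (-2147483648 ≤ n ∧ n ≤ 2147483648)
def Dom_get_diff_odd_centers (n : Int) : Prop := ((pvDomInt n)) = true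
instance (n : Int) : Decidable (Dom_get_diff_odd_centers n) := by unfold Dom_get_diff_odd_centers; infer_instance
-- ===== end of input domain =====

-- B precomputes the interior checkerboard of one face (striding the columns instead of
-- testing parities per cell) and tiles it across the 6 faces by an additive offset;
-- objective: simpler (no per-cell parity test, no per-face recomputation).

-- ===== PORT A =====
def get_diff_odd_centers (n : Int) : List Int :=
  let n2 := n ^ 2
  (PySem.List.pyRange 0 (6 * n2) n2).foldl (fun acc face_start =>
    (PySem.List.pyRange 1 (n - 1) 1).foldl (fun acc row =>
      (PySem.List.pyRange 1 (n - 1) 1).foldl (fun acc col =>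
        if PySem.Int.mod row 2 = 0 ∧ PySem.Int.mod col 2 = 1 then
          acc ++ [face_start + row * n + col]
        else if PySem.Int.mod row 2 = 1 ∧ PySem.Int.mod col 2 = 0 then
          acc ++ [face_start + row * n + col]
        else acc) acc) acc) []

-- ===== PORT B =====
def get_diff_odd_centers_alt (n : Int) : List Int :=
  let base := (PySem.List.pyRange 1 (n - 1) 1).foldl (fun acc row =>
    acc ++ (PySem.List.pyRange (1 + PySem.Int.mod row 2) (n - 1) 2).map
      (fun col => row * n + col)) []
  (PySem.List.pyRange 0 6 1).flatMap (fun f => base.map (fun b => f * n * n + b))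

-- ===== PRECONDITION & SPEC =====
-- Pre_ excludes only n = 0, where A's `range(0, 0, 0)` raises ValueError (step 0).
def Pre_get_diff_odd_centers (n : Int) : Prop := n ≠ 0
instance (n : Int) : Decidable (Pre_get_diff_odd_centers n) := by unfold Pre_get_diff_odd_centers; infer_instance
def pvWitness_get_diff_odd_centers : Int := 4

def Spec_get_diff_odd_centers (n : Int) (out : List Int) : Prop := out = get_diff_odd_centers_alt n
instance (n : Int) (out : List Int) : Decidable (Spec_get_diff_odd_centers n out) := by unfold Spec_get_diff_odd_centers; infer_instance

-- ===== CLAIM (what is proved, stated in full; the proofs are below) =====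
def Claim_equal_get_diff_odd_centers : Prop := ∀ (n : Int), Dom_get_diff_odd_centers n → Pre_get_diff_odd_centers n → Spec_get_diff_odd_centers n (get_diff_odd_centers n)

-- ===== LEMMAS AND PROOFS =====

-- Python `x % 2` is fmod; for the positive divisor 2 it is emod.
theorem pvMod2 (x : Int) : PySem.Int.mod x 2 = x % 2 := by
  simp [PySem.Int.mod, Int.fmod_eq_emod]

-- an empty step-2 range
theorem pvRangeTwoNil (s b : Int) (h : b ≤ s) : PySem.List.pyRange s b 2 = [] := by
  rw [PySem.List.pyRange_of_pos _ _ (by norm_num), if_neg (by omega)]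
  simp

-- extending a step-2 range by one slot at the top
theorem pyRange_two_succ (s k : Int) :
    PySem.List.pyRange s (k + 1) 2 =
      PySem.List.pyRange s k 2 ++ (if s ≤ k ∧ (k - s) % 2 = 0 then [k] else []) := by
  rw [PySem.List.pyRange_of_pos _ _ (by norm_num), PySem.List.pyRange_of_pos _ _ (by norm_num)]
  rcases le_or_gt s k with h | h
  · have h1 : s < k + 1 := by omega
    rw [if_pos h1]
    rcases Int.even_or_odd (k - s) with ⟨t, ht⟩ | ⟨t, ht⟩
    · have ht' : 0 ≤ t := by omega
      have hc2 : ((k + 1 - s + 2 - 1) / 2).toNat = t.toNat + 1 := by omega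
      have hc1 : (if s < k then ((k - s + 2 - 1) / 2).toNat else 0) = t.toNat := by
        split <;> omega
      have hmod : s ≤ k ∧ (k - s) % 2 = 0 := ⟨h, by omega⟩
      rw [hc2, hc1, if_pos hmod, List.range_succ, List.map_append, List.map_cons, List.map_nil]
      have : s + 2 * (t.toNat : Int) = k := by omega
      rw [this]
    · have ht' : 0 ≤ t := by omega
      have hc2 : ((k + 1 - s + 2 - 1) / 2).toNat = t.toNat + 1 := by omega
      have hc1 : (if s < k then ((k - s + 2 - 1) / 2).toNat else 0) = t.toNat + 1 := by
        split <;> omega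
      have hmod : ¬ (s ≤ k ∧ (k - s) % 2 = 0) := by omega
      rw [hc2, hc1, if_neg hmod, List.append_nil]
  · have h1 : ¬ s < k + 1 := by omega
    have h2 : ¬ s < k := by omega
    have h3 : ¬ (s ≤ k ∧ (k - s) % 2 = 0) := by omega
    rw [if_neg h1, if_neg h2, if_neg h3, List.append_nil]

-- A's innermost column loop produces exactly the strided column range of B's template row.
theorem pvColLoop (n fs row : Int) :
    ∀ (k : Int) (acc : List Int),
      (PySem.List.pyRange 1 k 1).foldl (fun acc col =>
        if PySem.Int.mod row 2 = 0 ∧ PySem.Int.mod col 2 = 1 then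
          acc ++ [fs + row * n + col]
        else if PySem.Int.mod row 2 = 1 ∧ PySem.Int.mod col 2 = 0 then
          acc ++ [fs + row * n + col]
        else acc) acc
      = acc ++ (PySem.List.pyRange (1 + PySem.Int.mod row 2) k 2).map
          (fun col => fs + row * n + col) := by
  have hr : PySem.Int.mod row 2 = row % 2 := pvMod2 row
  have hr01 : row % 2 = 0 ∨ row % 2 = 1 := by omega
  have main : ∀ m : Int, 1 ≤ m → ∀ acc : List Int,
      (PySem.List.pyRange 1 m 1).foldl (fun acc col =>
        if PySem.Int.mod row 2 = 0 ∧ PySem.Int.mod col 2 = 1 then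
          acc ++ [fs + row * n + col]
        else if PySem.Int.mod row 2 = 1 ∧ PySem.Int.mod col 2 = 0 then
          acc ++ [fs + row * n + col]
        else acc) acc
      = acc ++ (PySem.List.pyRange (1 + PySem.Int.mod row 2) m 2).map
          (fun col => fs + row * n + col) := by
    intro m hm
    induction m, hm using Int.le_induction with
    | base =>
      intro acc
      have h1 : PySem.List.pyRange 1 1 1 = [] := PySem.List.pyRange_one_eq_nil (by omega)
      have h2 : PySem.List.pyRange (1 + PySem.Int.mod row 2) 1 2 = [] :=
        pvRangeTwoNil _ _ (by rw [hr]; omega)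
      rw [h1, h2]
      simp
    | succ k hk1 ih =>
      intro acc
      have hc : PySem.Int.mod k 2 = k % 2 := pvMod2 k
      rw [PySem.List.pyRange_one_succ_right (by omega : (1:Int) ≤ k), List.foldl_append,
        ih, List.foldl_cons, List.foldl_nil, pyRange_two_succ, List.map_append]
      simp only [hr, hc]
      by_cases hP : (1 : Int) + row % 2 ≤ k ∧ (k - (1 + row % 2)) % 2 = 0
      · rw [if_pos hP]
        rcases hr01 with h | h
        · have hcond : row % 2 = 0 ∧ k % 2 = 1 := by omega
          rw [if_pos hcond]
          simp
        · have h1 : ¬ (row % 2 = 0 ∧ k % 2 = 1) := by omega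
          have h2 : row % 2 = 1 ∧ k % 2 = 0 := by omega
          rw [if_neg h1, if_pos h2]
          simp
      · have h1 : ¬ (row % 2 = 0 ∧ k % 2 = 1) := by omega
        have h2 : ¬ (row % 2 = 1 ∧ k % 2 = 0) := by omega
        rw [if_neg h1, if_neg h2, if_neg hP]
        simp
  intro k
  rcases le_or_gt k 1 with hk | hk
  · intro acc
    have h1 : PySem.List.pyRange 1 k 1 = [] := PySem.List.pyRange_one_eq_nil (by omega)
    have h2 : PySem.List.pyRange (1 + PySem.Int.mod row 2) k 2 = [] :=
      pvRangeTwoNil _ _ (by rw [hr]; omega)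
    rw [h1, h2]
    simp
  · exact main k (by omega)

-- ===== VERDICT (by name: the statement is the Claim_ definition above) =====
theorem get_diff_odd_centers_spec : Claim_equal_get_diff_odd_centers := by
  intro n _ hn
  unfold Pre_get_diff_odd_centers at hn
  unfold Spec_get_diff_odd_centers get_diff_odd_centers get_diff_odd_centers_alt
  have hn2 : (0 : Int) < n ^ 2 := by
    have h := mul_self_pos.mpr hn
    simpa [sq] using h
  have hfaces : PySem.List.pyRange 0 (6 * n ^ 2) (n ^ 2)
      = ([0, 1, 2, 3, 4, 5] : List Int).map (fun k => 0 + n ^ 2 * k) := by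
    rw [PySem.List.pyRange_of_pos _ _ hn2]
    have hval : (6 * n ^ 2 - 0 + n ^ 2 - 1) / n ^ 2 = 6 := by
      have e1 : 6 * n ^ 2 - 0 + n ^ 2 - 1 = (n ^ 2 - 1) + 6 * n ^ 2 := by ring
      rw [e1, Int.add_mul_ediv_right _ _ (ne_of_gt hn2),
        Int.ediv_eq_zero_of_lt (by omega) (by omega)]
      norm_num
    have h6 : (0 : Int) < 6 * n ^ 2 := by omega
    rw [if_pos h6, hval]
    rfl
  have h6 : PySem.List.pyRange 0 6 1 = ([0, 1, 2, 3, 4, 5] : List Int) := by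
    decide
  -- A's two inner loops, for one face offset, give B's template shifted by that offset
  have hA : ∀ fs acc, (PySem.List.pyRange 1 (n - 1) 1).foldl (fun acc row =>
      (PySem.List.pyRange 1 (n - 1) 1).foldl (fun acc col =>
        if PySem.Int.mod row 2 = 0 ∧ PySem.Int.mod col 2 = 1 then
          acc ++ [fs + row * n + col]
        else if PySem.Int.mod row 2 = 1 ∧ PySem.Int.mod col 2 = 0 then
          acc ++ [fs + row * n + col]
        else acc) acc) acc
      = acc ++ (PySem.List.pyRange 1 (n - 1) 1).flatMap (fun row =>
          (PySem.List.pyRange (1 + PySem.Int.mod row 2) (n - 1) 2).map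
            (fun col => fs + row * n + col)) := by
    intro fs acc
    rw [PySem.List.foldl_congr_mem' _ _
      (fun acc row => acc ++ (PySem.List.pyRange (1 + PySem.Int.mod row 2) (n - 1) 2).map
        (fun col => fs + row * n + col)) _
      (fun row _ acc' => pvColLoop n fs row (n - 1) acc'),
      PySem.List.foldl_append_eq_flatMap]
  simp only []
  rw [hfaces, h6,
    PySem.List.foldl_congr_mem' _ _
      (fun acc fs => acc ++ (PySem.List.pyRange 1 (n - 1) 1).flatMap (fun row =>
        (PySem.List.pyRange (1 + PySem.Int.mod row 2) (n - 1) 2).map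
          (fun col => fs + row * n + col))) _
      (fun fs _ acc => hA fs acc),
    PySem.List.foldl_append_eq_flatMap, List.nil_append,
    PySem.List.foldl_append_eq_flatMap, List.nil_append,
    List.flatMap_map]
  apply List.flatMap_congr
  intro k _
  rw [List.map_flatMap]
  apply List.flatMap_congr
  intro row _
  rw [List.map_map]
  apply List.map_congr_left
  intro col _
  simp only [Function.comp_apply]
  ring
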